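-- pv_equiv track=rewrite | github.com/clevis-001/Algorithm | Sort/ChangeElement.py | solution
-- ===== SOURCE A (Python) =====
-- def solution(k, arr1, arr2):
--     for i in range(k):
--         max_arr2 = max(arr2)
--         arr2.remove(max_arr2)
--         arr1.remove(min(arr1))
--         arr1.append(max_arr2)
--
--     result = 0
--
--     for number in arr1:
--         result += number
--
--     return result
-- ===== SOURCE B (Python) =====
-- # B: sort once and two-pointer simulate the k swaps instead of rescanning both lists each round
-- # (A mutates arr1/arr2 in place; B does not — equivalence is about the return value).
-- def solution(k, arr1, arr2):
--     a = sorted(arr1)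
--     vs = sorted(arr2, reverse=True)[:k] if k > 0 else []
--     total = sum(arr1)
--     j = 0
--     prev = None
--     for v in vs:
--         if prev is None or (j < len(a) and a[j] <= prev):
--             total += v - a[j]
--             j += 1
--         else:
--             total += v - prev
--         prev = v
--     return total
-- ===== Notes on version B (the rewrite author's own statement) =====
-- stated objective: faster
-- what changed: A rescans arr2 for its max and arr1 for its min on every one of the k rounds (removing/appending in place); B sorts arr1 ascending and arr2 descending once and simulates the k swaps with a two-pointer pass that tracks only the running total, the arr1 pointer and the most recently swapped-in value.
import Mathlib
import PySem

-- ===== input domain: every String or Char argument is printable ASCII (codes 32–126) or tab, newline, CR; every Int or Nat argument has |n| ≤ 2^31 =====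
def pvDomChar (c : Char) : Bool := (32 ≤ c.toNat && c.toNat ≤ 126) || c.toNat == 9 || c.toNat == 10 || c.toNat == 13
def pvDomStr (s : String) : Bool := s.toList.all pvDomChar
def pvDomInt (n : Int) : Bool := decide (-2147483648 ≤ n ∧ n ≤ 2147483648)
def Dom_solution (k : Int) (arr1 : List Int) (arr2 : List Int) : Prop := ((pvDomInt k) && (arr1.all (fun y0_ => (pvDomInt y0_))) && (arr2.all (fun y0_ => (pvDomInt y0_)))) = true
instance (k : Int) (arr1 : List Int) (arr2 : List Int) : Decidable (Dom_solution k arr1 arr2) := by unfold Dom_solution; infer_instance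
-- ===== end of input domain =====

-- B replaces A's k rescans of both lists (max(arr2)/min(arr1) each round) by sorting once and a
-- two-pointer pass; A mutates arr1/arr2 in place, B does not — the equivalence is about the return value.

-- ===== PORT A =====
-- A's for-loop: max_arr2 = max(arr2); arr2.remove(max_arr2); arr1.remove(min(arr1)); arr1.append(max_arr2).
-- none = the Python raises (max/min of an empty list); such inputs are excluded by Pre_solution.
def solutionLoop : Nat → List Int → List Int → Option (List Int × List Int)
  | 0, a1, a2 => some (a1, a2)
  | n+1, a1, a2 =>
    match PySem.List.max? a2 (fun x => x) with
    | none => none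
    | some maxArr2 =>
      match PySem.List.remove? a2 maxArr2 with
      | none => none
      | some a2' =>
        match PySem.List.min? a1 (fun x => x) with
        | none => none
        | some mn =>
          match PySem.List.remove? a1 mn with
          | none => none
          | some a1' => solutionLoop n (a1' ++ [maxArr2]) a2'

def solution (k : Int) (arr1 : List Int) (arr2 : List Int) : Int :=
  match solutionLoop k.toNat arr1 arr2 with
  | none => 0  -- unreachable under Pre_solution (the Python raises here)
  | some (a1, _) => a1.foldl (fun result number => result + number) 0

-- ===== PORT B =====
-- One iteration of B's for-loop over the k largest arr2 values (state = (total, j, prev)).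
-- a.getD j 0 is a[j]; the only out-of-range access B can make is excluded by Pre_solution (Python IndexError).
def solutionAltStep (a : List Int) (s : Int × Nat × Option Int) (v : Int) : Int × Nat × Option Int :=
  match s with
  | (total, j, prev) =>
    match prev with
    | none => (total + (v - a.getD j 0), j + 1, some v)
    | some p =>
      if j < a.length ∧ a.getD j 0 ≤ p then (total + (v - a.getD j 0), j + 1, some v)
      else (total + (v - p), j, some v)

def solution_alt (k : Int) (arr1 : List Int) (arr2 : List Int) : Int :=
  let a := PySem.List.sorted arr1 (fun x => x) false
  let vs := if 0 < k then (PySem.List.sorted arr2 (fun x => x) true).take k.toNat else []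
  (vs.foldl (solutionAltStep a) (arr1.sum, 0, none)).1

-- ===== PRECONDITION & SPEC =====
-- Pre_ excludes exactly the inputs where A raises a ValueError: max(arr2) with fewer than k
-- elements left, or min(arr1) on an empty arr1 (arr1's length is constant over the loop).
def Pre_solution (k : Int) (arr1 : List Int) (arr2 : List Int) : Prop :=
  k ≤ (arr2.length : Int) ∧ (0 < k → arr1 ≠ [])
instance (k : Int) (arr1 : List Int) (arr2 : List Int) : Decidable (Pre_solution k arr1 arr2) := by
  unfold Pre_solution; infer_instance

def pvWitness_solution : Int × List Int × List Int := (1, [1, 2], [3])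

def Spec_solution (k : Int) (arr1 : List Int) (arr2 : List Int) (out : Int) : Prop := out = solution_alt k arr1 arr2
instance (k : Int) (arr1 : List Int) (arr2 : List Int) (out : Int) : Decidable (Spec_solution k arr1 arr2 out) := by unfold Spec_solution; infer_instance

-- ===== CLAIM (what is proved, stated in full; the proofs are below) =====
def Claim_equal_solution : Prop := ∀ (k : Int) (arr1 : List Int) (arr2 : List Int), Dom_solution k arr1 arr2 → Pre_solution k arr1 arr2 → Spec_solution k arr1 arr2 (solution k arr1 arr2)

-- ===== LEMMAS AND PROOFS =====

-- Python min(l) (as a value): any member that bounds the list below is the min.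
lemma min?_eq_of_isMin (l : List Int) (p : Int) (hm : p ∈ l) (hb : ∀ y ∈ l, p ≤ y) :
    PySem.List.min? l (fun y => y) = some p := by
  cases h : PySem.List.min? l (fun y => y) with
  | none => rw [PySem.List.min?_eq_none_iff] at h; subst h; simp at hm
  | some q =>
    have hq := PySem.List.min?_mem h
    have h1 := PySem.List.min?_isMin h p hm
    have h2 := hb q hq
    rw [le_antisymm h1 h2]

-- Python max(l) (as a value): any member that bounds the list above is the max.
lemma max?_eq_of_isMax (l : List Int) (m : Int) (hm : m ∈ l) (hb : ∀ y ∈ l, y ≤ m) :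
    PySem.List.max? l (fun y => y) = some m := by
  cases h : PySem.List.max? l (fun y => y) with
  | none => rw [PySem.List.max?_eq_none_iff] at h; subst h; simp at hm
  | some q =>
    have hq := PySem.List.max?_mem h
    have h1 := PySem.List.max?_isMax h m hm
    have h2 := hb q hq
    rw [le_antisymm h2 h1]

-- list.remove skips a prefix that does not contain the value.
lemma remove?_append_of_not_mem (l1 l2 : List Int) (v : Int) (h : v ∉ l1) :
    PySem.List.remove? (l1 ++ l2) v = (PySem.List.remove? l2 v).map (l1 ++ ·) := by
  induction l1 with
  | nil => simp
  | cons x xs ih =>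
    have hx : x ≠ v := fun he => h (by simp [he])
    have hxs : v ∉ xs := fun he => h (by simp [he])
    rw [List.cons_append, PySem.List.remove?_cons_of_ne _ hx, ih hxs]
    cases PySem.List.remove? l2 v <;> simp

-- In a weakly descending list the last element bounds the list below.
lemma getLast?_le_of_desc (w : List Int) (p : Int)
    (hd : w.Pairwise (fun x y => y ≤ x)) (hl : w.getLast? = some p) : ∀ y ∈ w, p ≤ y := by
  induction w with
  | nil => simp at hl
  | cons x xs ih =>
    intro y hy
    cases xs with
    | nil => simp at hl hy; omega
    | cons a b =>
      rw [List.getLast?_cons_cons] at hl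
      rcases List.mem_cons.mp hy with rfl | hy'
      · have hm := List.mem_of_getLast? hl
        exact (List.pairwise_cons.mp hd).1 p hm
      · exact ih (List.pairwise_cons.mp hd).2 hl y hy'

-- A's loop respects permutation of both lists (only the multisets matter).
lemma solutionLoop_perm : ∀ (n : Nat) (a1 b1 a2 b2 : List Int), a1.Perm b1 → a2.Perm b2 →
    (solutionLoop n a1 a2 = none ∧ solutionLoop n b1 b2 = none) ∨
    (∃ s t, solutionLoop n a1 a2 = some s ∧ solutionLoop n b1 b2 = some t ∧
      s.1.Perm t.1 ∧ s.2.Perm t.2) := by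
  intro n
  induction n with
  | zero => intro a1 b1 a2 b2 h1 h2; right; exact ⟨(a1, a2), (b1, b2), rfl, rfl, h1, h2⟩
  | succ n ih =>
    intro a1 b1 a2 b2 h1 h2
    by_cases ha2 : a2 = []
    · have hb2 : b2 = [] := (ha2 ▸ h2.symm).eq_nil
      have h0a : PySem.List.max? a2 (fun x => x) = none :=
        (PySem.List.max?_eq_none_iff _ _).mpr ha2
      have h0b : PySem.List.max? b2 (fun x => x) = none :=
        (PySem.List.max?_eq_none_iff _ _).mpr hb2
      left
      constructor <;> simp [solutionLoop, h0a, h0b]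
    · have hb2ne : b2 ≠ [] := fun h => ha2 (h ▸ h2).eq_nil
      obtain ⟨m, hm⟩ : ∃ m, PySem.List.max? a2 (fun x => x) = some m := by
        cases hq : PySem.List.max? a2 (fun x => x) with
        | none => exact absurd ((PySem.List.max?_eq_none_iff _ _).mp hq) ha2
        | some q => exact ⟨q, rfl⟩
      obtain ⟨m', hm'⟩ : ∃ m', PySem.List.max? b2 (fun x => x) = some m' := by
        cases hq : PySem.List.max? b2 (fun x => x) with
        | none => exact absurd ((PySem.List.max?_eq_none_iff _ _).mp hq) hb2ne
        | some q => exact ⟨q, rfl⟩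
      have hmm : m = m' := by
        have hma := PySem.List.max?_mem hm
        have hmb := PySem.List.max?_mem hm'
        exact le_antisymm (PySem.List.max?_isMax hm' m (h2.mem_iff.mp hma))
          (PySem.List.max?_isMax hm m' (h2.mem_iff.mpr hmb))
      subst hmm
      have hra : PySem.List.remove? a2 m = some (a2.erase m) :=
        PySem.List.remove?_eq_some_erase _ _ (PySem.List.max?_mem hm)
      have hrb : PySem.List.remove? b2 m = some (b2.erase m) :=
        PySem.List.remove?_eq_some_erase _ _ (h2.mem_iff.mp (PySem.List.max?_mem hm))
      by_cases ha1 : a1 = []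
      · have hb1 : b1 = [] := (ha1 ▸ h1.symm).eq_nil
        have h0a : PySem.List.min? a1 (fun x => x) = none :=
          (PySem.List.min?_eq_none_iff _ _).mpr ha1
        have h0b : PySem.List.min? b1 (fun x => x) = none :=
          (PySem.List.min?_eq_none_iff _ _).mpr hb1
        left
        constructor <;> simp [solutionLoop, hm, hm', hra, hrb, h0a, h0b]
      · have hb1ne : b1 ≠ [] := fun h => ha1 (h ▸ h1).eq_nil
        obtain ⟨mn, hmn⟩ : ∃ q, PySem.List.min? a1 (fun x => x) = some q := by
          cases hq : PySem.List.min? a1 (fun x => x) with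
          | none => exact absurd ((PySem.List.min?_eq_none_iff _ _).mp hq) ha1
          | some q => exact ⟨q, rfl⟩
        obtain ⟨mn', hmn'⟩ : ∃ q, PySem.List.min? b1 (fun x => x) = some q := by
          cases hq : PySem.List.min? b1 (fun x => x) with
          | none => exact absurd ((PySem.List.min?_eq_none_iff _ _).mp hq) hb1ne
          | some q => exact ⟨q, rfl⟩
        have hmn2 : mn = mn' := by
          have hma := PySem.List.min?_mem hmn
          have hmb := PySem.List.min?_mem hmn'
          exact le_antisymm (PySem.List.min?_isMin hmn mn' (h1.mem_iff.mpr hmb))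
            (PySem.List.min?_isMin hmn' mn (h1.mem_iff.mp hma))
        subst hmn2
        have hr1a : PySem.List.remove? a1 mn = some (a1.erase mn) :=
          PySem.List.remove?_eq_some_erase _ _ (PySem.List.min?_mem hmn)
        have hr1b : PySem.List.remove? b1 mn = some (b1.erase mn) :=
          PySem.List.remove?_eq_some_erase _ _ (h1.mem_iff.mp (PySem.List.min?_mem hmn))
        have step : solutionLoop (n+1) a1 a2 =
            solutionLoop n (a1.erase mn ++ [m]) (a2.erase m) := by
          simp [solutionLoop, hm, hra, hmn, hr1a]
        have step' : solutionLoop (n+1) b1 b2 =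
            solutionLoop n (b1.erase mn ++ [m]) (b2.erase m) := by
          simp [solutionLoop, hm', hrb, hmn', hr1b]
        rw [step, step']
        exact ih _ _ _ _ ((h1.erase mn).append (List.Perm.refl [m])) (h2.erase m)

-- Main invariant: on a sorted-ascending `a` and a descending arr2-state, A's loop computes
-- exactly B's two-pointer fold.  `w` = the surviving swapped-in values, in insertion order:
-- weakly descending and ending in `prev`; A's arr1-state is `a.drop j ++ w`.
lemma solutionLoop_twoPointer :
    ∀ (vs r a : List Int) (j : Nat) (w : List Int) (prev : Option Int) (t : Int),
      a.Pairwise (· ≤ ·) →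
      w.Pairwise (fun x y => y ≤ x) →
      (vs ++ r).Pairwise (fun x y => y ≤ x) →
      ((w = [] ∧ prev = none ∧ j < a.length) ∨
        (∃ p, prev = some p ∧ w.getLast? = some p ∧ ∀ v ∈ vs, v ≤ p)) →
      t = (a.drop j ++ w).sum →
      (solutionLoop vs.length (a.drop j ++ w) (vs ++ r)).map (fun s => s.1.sum)
        = some (vs.foldl (solutionAltStep a) (t, j, prev)).1 := by
  intro vs
  induction vs with
  | nil =>
    intro r a j w prev t _ _ _ _ ht
    simp [solutionLoop, ht]
  | cons v vs' ih =>
    intro r a j w prev t ha hw hdesc hcase ht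
    rw [List.cons_append] at hdesc ⊢
    have hvtop : ∀ y ∈ vs' ++ r, y ≤ v := (List.pairwise_cons.mp hdesc).1
    have hdesc' : (vs' ++ r).Pairwise (fun x y => y ≤ x) := (List.pairwise_cons.mp hdesc).2
    have hvv : ∀ u ∈ vs', u ≤ v := fun u hu => hvtop u (List.mem_append_left _ hu)
    have hmax : PySem.List.max? (v :: (vs' ++ r)) (fun x => x) = some v := by
      apply max?_eq_of_isMax _ _ List.mem_cons_self
      intro y hy
      rcases List.mem_cons.mp hy with rfl | hy'
      · exact le_refl _
      · exact hvtop y hy'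
    have hrem2 : PySem.List.remove? (v :: (vs' ++ r)) v = some (vs' ++ r) :=
      PySem.List.remove?_cons_self _ _
    rcases hcase with ⟨hw0, hprev, hj⟩ | ⟨p, hprev, hlast, hvp⟩
    · -- first iteration: prev = None, arr1-state is a.drop j itself
      subst hw0; subst hprev
      have hgd : a.getD j 0 = a[j] := by
        simp [List.getD_eq_getElem?_getD, List.getElem?_eq_getElem hj]
      have hdropj : a.drop j = a[j] :: a.drop (j+1) := List.drop_eq_getElem_cons hj
      have hdp : (a.drop j).Pairwise (· ≤ ·) := ha.sublist (List.drop_sublist _ _)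
      have hge : ∀ y ∈ a.drop (j+1), a[j] ≤ y := by
        rw [hdropj] at hdp; exact (List.pairwise_cons.mp hdp).1
      have hmin : PySem.List.min? (a.drop j) (fun x => x) = some a[j] := by
        rw [hdropj]
        apply min?_eq_of_isMin _ _ List.mem_cons_self
        intro y hy
        rcases List.mem_cons.mp hy with rfl | hy'
        · exact le_refl _
        · exact hge y hy'
      have hrem1 : PySem.List.remove? (a.drop j) a[j] = some (a.drop (j+1)) := by
        rw [hdropj]; exact PySem.List.remove?_cons_self _ _
      have hstep : solutionLoop (vs'.length + 1) (a.drop j ++ []) (v :: (vs' ++ r)) =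
          solutionLoop vs'.length (a.drop (j+1) ++ [v]) (vs' ++ r) := by
        simp [solutionLoop, hmax, hrem2, hmin, hrem1]
      have hds : (a.drop j).sum = a[j] + (a.drop (j+1)).sum := by
        rw [hdropj, List.sum_cons]
      have hsum : t + (v - a.getD j 0) = (a.drop (j+1) ++ [v]).sum := by
        rw [hgd]
        simp [List.sum_append] at ht ⊢
        omega
      have hfold : solutionAltStep a (t, j, none) v = (t + (v - a.getD j 0), j + 1, some v) := rfl
      rw [List.length_cons, hstep, List.foldl_cons, hfold]
      exact ih r a (j+1) [v] (some v) _ ha (List.pairwise_singleton _ _) hdesc'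
        (Or.inr ⟨v, rfl, rfl, hvv⟩) hsum
    · -- prev = Some p: the running minimum of the swapped-in values is p = last w
      subst hprev
      have hwne : w ≠ [] := by intro h; rw [h] at hlast; simp at hlast
      have hpw : p ∈ w := List.mem_of_getLast? hlast
      have hplow : ∀ y ∈ w, p ≤ y := getLast?_le_of_desc w p hw hlast
      have hvps : v ≤ p := hvp v List.mem_cons_self
      by_cases hc : j < a.length ∧ a.getD j 0 ≤ p
      · -- a[j] is the overall minimum: advance the pointer
        obtain ⟨hj, hjp⟩ := hc
        have hgd : a.getD j 0 = a[j] := by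
          simp [List.getD_eq_getElem?_getD, List.getElem?_eq_getElem hj]
        have hdropj : a.drop j = a[j] :: a.drop (j+1) := List.drop_eq_getElem_cons hj
        have hdp : (a.drop j).Pairwise (· ≤ ·) := ha.sublist (List.drop_sublist _ _)
        have hge : ∀ y ∈ a.drop (j+1), a[j] ≤ y := by
          rw [hdropj] at hdp; exact (List.pairwise_cons.mp hdp).1
        have hmin : PySem.List.min? (a.drop j ++ w) (fun y => y) = some a[j] := by
          rw [hdropj, List.cons_append]
          apply min?_eq_of_isMin _ _ List.mem_cons_self
          intro y hy
          rcases List.mem_cons.mp hy with rfl | hy'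
          · exact le_refl _
          · rcases List.mem_append.mp hy' with h1 | h2
            · exact hge y h1
            · rw [hgd] at hjp; exact le_trans hjp (hplow y h2)
        have hrem1 : PySem.List.remove? (a.drop j ++ w) a[j] = some (a.drop (j+1) ++ w) := by
          rw [hdropj, List.cons_append]; exact PySem.List.remove?_cons_self _ _
        have hstep : solutionLoop (vs'.length + 1) (a.drop j ++ w) (v :: (vs' ++ r)) =
            solutionLoop vs'.length (a.drop (j+1) ++ (w ++ [v])) (vs' ++ r) := by
          simp [solutionLoop, hmax, hrem2, hmin, hrem1, List.append_assoc]
        have hwv : (w ++ [v]).Pairwise (fun x y => y ≤ x) := by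
          rw [List.pairwise_append]
          exact ⟨hw, List.pairwise_singleton _ _,
            fun x hx y hy => by
              rw [List.mem_singleton.mp hy]; exact le_trans hvps (hplow x hx)⟩
        have hds : (a.drop j).sum = a[j] + (a.drop (j+1)).sum := by
          rw [hdropj, List.sum_cons]
        have hsum : t + (v - a.getD j 0) = (a.drop (j+1) ++ (w ++ [v])).sum := by
          rw [hgd]
          simp [List.sum_append] at ht ⊢
          omega
        have hfold : solutionAltStep a (t, j, some p) v =
            (t + (v - a.getD j 0), j + 1, some v) := by
          simp only [solutionAltStep]
          rw [if_pos ⟨hj, hjp⟩]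
        rw [List.length_cons, hstep, List.foldl_cons, hfold]
        exact ih r a (j+1) (w ++ [v]) (some v) _ ha hwv hdesc'
          (Or.inr ⟨v, rfl, List.getLast?_concat, hvv⟩) hsum
      · -- p is the overall minimum: it is replaced by v
        have hclt : ∀ y ∈ a.drop j, p < y := by
          intro y hy
          by_cases hj : j < a.length
          · have hdropj : a.drop j = a[j] :: a.drop (j+1) := List.drop_eq_getElem_cons hj
            have hdp : (a.drop j).Pairwise (· ≤ ·) := ha.sublist (List.drop_sublist _ _)
            have hge : ∀ z ∈ a.drop (j+1), a[j] ≤ z := by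
              rw [hdropj] at hdp; exact (List.pairwise_cons.mp hdp).1
            have hgd : a.getD j 0 = a[j] := by
              simp [List.getD_eq_getElem?_getD, List.getElem?_eq_getElem hj]
            have hpj : p < a[j] := by
              by_contra hle
              exact hc ⟨hj, by rw [hgd]; omega⟩
            rw [hdropj] at hy
            rcases List.mem_cons.mp hy with rfl | hy'
            · exact hpj
            · exact lt_of_lt_of_le hpj (hge y hy')
          · rw [List.drop_eq_nil_of_le (le_of_not_gt hj)] at hy
            cases hy
        have hpnot : p ∉ a.drop j := fun h => lt_irrefl p (hclt p h)
        have hmin : PySem.List.min? (a.drop j ++ w) (fun y => y) = some p := by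
          apply min?_eq_of_isMin _ _ (List.mem_append_right _ hpw)
          intro y hy
          rcases List.mem_append.mp hy with h1 | h2
          · exact le_of_lt (hclt y h1)
          · exact hplow y h2
        have hrem1 : PySem.List.remove? (a.drop j ++ w) p = some (a.drop j ++ w.erase p) := by
          rw [remove?_append_of_not_mem _ _ _ hpnot,
            PySem.List.remove?_eq_some_erase _ _ hpw]
          rfl
        have hstep : solutionLoop (vs'.length + 1) (a.drop j ++ w) (v :: (vs' ++ r)) =
            solutionLoop vs'.length (a.drop j ++ (w.erase p ++ [v])) (vs' ++ r) := by
          simp [solutionLoop, hmax, hrem2, hmin, hrem1, List.append_assoc]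
        have hwe : (w.erase p).Pairwise (fun x y => y ≤ x) :=
          hw.sublist (List.erase_sublist ..)
        have hwv : (w.erase p ++ [v]).Pairwise (fun x y => y ≤ x) := by
          rw [List.pairwise_append]
          exact ⟨hwe, List.pairwise_singleton _ _,
            fun x hx y hy => by
              rw [List.mem_singleton.mp hy]
              exact le_trans hvps (hplow x (List.mem_of_mem_erase hx))⟩
        have hsumw : w.sum = p + (w.erase p).sum := by
          have := (List.perm_cons_erase hpw).sum_eq
          simpa using this
        have hsum : t + (v - p) = (a.drop j ++ (w.erase p ++ [v])).sum := by
          simp [List.sum_append, List.sum_cons] at ht ⊢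
          omega
        have hfold : solutionAltStep a (t, j, some p) v = (t + (v - p), j, some v) := by
          simp only [solutionAltStep]
          rw [if_neg hc]
        rw [List.length_cons, hstep, List.foldl_cons, hfold]
        exact ih r a j (w.erase p ++ [v]) (some v) _ ha hwv hdesc'
          (Or.inr ⟨v, rfl, List.getLast?_concat, hvv⟩) hsum

-- ===== VERDICT (by name: the statement is the Claim_ definition above) =====
theorem solution_spec : Claim_equal_solution := by
  unfold Claim_equal_solution
  intro k arr1 arr2 _ hpre
  unfold Spec_solution
  obtain ⟨hk2, hk1⟩ := hpre
  by_cases hk : 0 < k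
  · -- k positive: run the invariant on the sorted copies, transfer by permutation
    have harr1 : arr1 ≠ [] := hk1 hk
    set a := PySem.List.sorted arr1 (fun x => x) false with hadef
    set sd := PySem.List.sorted arr2 (fun x => x) true with hsddef
    set n := k.toNat with hndef
    have ha_perm : a.Perm arr1 := PySem.List.sorted_perm ..
    have hsd_perm : sd.Perm arr2 := PySem.List.sorted_perm ..
    have hlen : n ≤ sd.length := by
      rw [hsd_perm.length_eq]
      omega
    have hvslen : (sd.take n).length = n := by
      rw [List.length_take]; omega
    have hsplit : sd.take n ++ sd.drop n = sd := List.take_append_drop ..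
    have hdesc : sd.Pairwise (fun x y => y ≤ x) := by
      have := PySem.List.sorted_pairwise_rev arr2 (fun x => x)
      simpa using this
    have ha_sorted : a.Pairwise (· ≤ ·) := by
      have := PySem.List.sorted_pairwise arr1 (fun x => x)
      simpa using this
    have hane : a ≠ [] := by
      intro h
      exact harr1 (by rwa [hadef, PySem.List.sorted_eq_nil_iff] at h)
    have hjlt : 0 < a.length := List.length_pos_of_ne_nil hane
    have hinv := solutionLoop_twoPointer (sd.take n) (sd.drop n) a 0 [] none arr1.sum
      ha_sorted (List.Pairwise.nil) (by rw [hsplit]; exact hdesc)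
      (Or.inl ⟨rfl, rfl, hjlt⟩)
      (by simp [ha_perm.sum_eq])
    rw [hvslen, hsplit] at hinv
    simp only [List.drop_zero, List.append_nil] at hinv
    rcases solutionLoop_perm n arr1 a arr2 sd ha_perm.symm hsd_perm.symm with
      ⟨_, hnone⟩ | ⟨s, u, hs, hu, hp1, _⟩
    · rw [hnone] at hinv; simp at hinv
    · rw [hu] at hinv
      simp only [Option.map_some, Option.some.injEq] at hinv
      obtain ⟨s1, s2⟩ := s
      have hA : solution k arr1 arr2 = s1.sum := by
        unfold solution
        rw [← hndef, hs]
        simp [List.sum_eq_foldl]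
      have hB : solution_alt k arr1 arr2 =
          ((sd.take n).foldl (solutionAltStep a) (arr1.sum, 0, none)).1 := by
        simp [solution_alt, hk, ← hadef, ← hsddef, ← hndef]
      rw [hA, hB, hp1.sum_eq]
      exact hinv
  · -- k ≤ 0: zero iterations on both sides
    have hn0 : k.toNat = 0 := by omega
    simp [solution, solution_alt, hk, hn0, solutionLoop, List.sum_eq_foldl]
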